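-- pv_equiv track=rewrite | github.com/loopclub2022/MonthLongChallenge | Anurag_19_CSE/Python/day11.py | useless_DP
-- ===== SOURCE A (Python) =====
-- def useless_DP(n: int) -> int:
--     dp = [[0] * 6 for _ in range(n+1)]
--
--     for i in range(1, 6):
--         dp[1][i] = i
--
--     for i in range(2, n+1):
--         dp[i][1] = 1
--
--         for j in range(2, 6):
--             dp[i][j] = dp[i][j-1] + dp[i-1][j]
--
--     return dp[n][5]
-- ===== SOURCE B (Python) =====
-- def useless_DP(n: int) -> int:
--     # The DP computes dp[n][5] = C(n+4, 4); closed-form polynomial, O(1).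
--     return (n + 1) * (n + 2) * (n + 3) * (n + 4) // 24
-- ===== Notes on version B (the rewrite author's own statement) =====
-- stated objective: faster
-- what changed: Replaced the (n+1)x6 DP table with the closed-form binomial C(n+4,4) = (n+1)(n+2)(n+3)(n+4)//24, obtained by solving the Pascal-style recurrence.
import Mathlib
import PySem

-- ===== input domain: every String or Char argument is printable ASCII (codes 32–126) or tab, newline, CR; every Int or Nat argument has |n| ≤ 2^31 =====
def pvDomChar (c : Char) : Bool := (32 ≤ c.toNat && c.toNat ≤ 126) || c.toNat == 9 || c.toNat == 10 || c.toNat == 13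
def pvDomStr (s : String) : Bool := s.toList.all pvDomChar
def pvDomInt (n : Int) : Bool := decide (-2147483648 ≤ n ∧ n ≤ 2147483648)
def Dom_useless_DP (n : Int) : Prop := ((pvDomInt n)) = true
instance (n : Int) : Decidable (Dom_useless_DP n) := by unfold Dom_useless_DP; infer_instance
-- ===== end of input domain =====

-- B replaces the O(n) DP table with the closed-form binomial C(n+4,4); objective: faster (asymptotic).

-- ===== PORT A =====
-- A-side helpers: the three loop bodies of A, named so the ports and proofs share them.
-- A mutates the outer Python list `dp` in place; it is ported as an Array (setIfInBounds = in-place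
-- index assignment, always in bounds under Pre_), rows stay PySem lists. Every row index A uses
-- (1, the loop variable i ∈ [2, n], and n) is nonnegative, so dp[i] is ported as d.getD i.toNat [].
-- dp[1][i] = i
def uDP_initStep (d : Array (List Int)) (i : Int) : Array (List Int) :=
  d.setIfInBounds 1 (PySem.List.pySetD (d.getD 1 []) i i)
-- dp[i][j] = dp[i][j-1] + dp[i-1][j]
def uDP_innerStep (i : Int) (d : Array (List Int)) (j : Int) : Array (List Int) :=
  d.setIfInBounds i.toNat (PySem.List.pySetD (d.getD i.toNat []) j
    (PySem.List.pyGetD (d.getD i.toNat []) (j - 1) 0 +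
     PySem.List.pyGetD (d.getD (i - 1).toNat []) j 0))
-- one iteration of the outer loop: dp[i][1] = 1, then the inner j-loop
def uDP_rowStep (d : Array (List Int)) (i : Int) : Array (List Int) :=
  (PySem.List.pyRange 2 6 1).foldl (uDP_innerStep i)
    (d.setIfInBounds i.toNat (PySem.List.pySetD (d.getD i.toNat []) 1 1))

def useless_DP (n : Int) : Int :=
  let dp : Array (List Int) :=
    ((PySem.List.pyRange 0 (n + 1) 1).map (fun _ => List.replicate 6 (0 : Int))).toArray
  let dp := (PySem.List.pyRange 1 6 1).foldl uDP_initStep dp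
  let dp := (PySem.List.pyRange 2 (n + 1) 1).foldl uDP_rowStep dp
  PySem.List.pyGetD (dp.getD n.toNat []) 5 0

-- ===== PORT B =====
def useless_DP_alt (n : Int) : Int :=
  PySem.Int.floordiv ((n + 1) * (n + 2) * (n + 3) * (n + 4)) 24

-- ===== PRECONDITION & SPEC =====
-- A indexes dp[1] (and returns dp[n]); for n ≤ 0 the table has no row 1 and A raises IndexError.
def Pre_useless_DP (n : Int) : Prop := 1 ≤ n
instance (n : Int) : Decidable (Pre_useless_DP n) := by unfold Pre_useless_DP; infer_instance
def pvWitness_useless_DP : Int := (3)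

def Spec_useless_DP (n : Int) (out : Int) : Prop := out = useless_DP_alt n
instance (n : Int) (out : Int) : Decidable (Spec_useless_DP n out) := by unfold Spec_useless_DP; infer_instance

-- ===== CLAIM (what is proved, stated in full; the proofs are below) =====
def Claim_equal_useless_DP : Prop := ∀ (n : Int), Dom_useless_DP n → Pre_useless_DP n → Spec_useless_DP n (useless_DP n)

-- ===== LEMMAS AND PROOFS =====

-- the column values of row k of the DP table, defined by their recurrences
def pvBF : Nat → Int
  | 0 => 1
  | n + 1 => pvBF n + ((n : Int) + 2)
def pvCF : Nat → Int
  | 0 => 1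
  | n + 1 => pvCF n + pvBF (n + 1)
def pvDF : Nat → Int
  | 0 => 1
  | n + 1 => pvDF n + pvCF (n + 1)
def pvRow (k : Nat) : List Int := [0, 1, (k : Int) + 1, pvBF k, pvCF k, pvDF k]

lemma pvBF_eq (k : Nat) : 2 * pvBF k = ((k : Int) + 1) * ((k : Int) + 2) := by
  induction k with
  | zero => simp [pvBF]
  | succ k ih => simp only [pvBF]; push_cast; linear_combination ih

lemma pvCF_eq (k : Nat) : 6 * pvCF k = ((k : Int) + 1) * ((k : Int) + 2) * ((k : Int) + 3) := by
  induction k with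
  | zero => simp [pvCF]
  | succ k ih =>
    have hb := pvBF_eq (k + 1)
    simp only [pvCF]; push_cast at hb ⊢; linear_combination ih + 3 * hb

lemma pvDF_eq (k : Nat) : 24 * pvDF k = ((k : Int) + 1) * ((k : Int) + 2) * ((k : Int) + 3) * ((k : Int) + 4) := by
  induction k with
  | zero => simp [pvDF]
  | succ k ih =>
    have hc := pvCF_eq (k + 1)
    simp only [pvDF]; push_cast at hc ⊢; linear_combination ih + 4 * hc

-- pointwise description of the table after the rows 1..i have been filled
def pvInv (n : Int) (i : Nat) (d : Array (List Int)) : Prop :=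
  d.size = (n + 1).toNat ∧
  ∀ k : Nat, k < (n + 1).toNat →
    d.getD k [] = (if 1 ≤ k ∧ k ≤ i then pvRow k else List.replicate 6 0)

lemma pvGetD_toNat {α : Type} (xs : List α) (i : Int) (d : α) (h : 0 ≤ i) :
    PySem.List.pyGetD xs i d = xs.getD i.toNat d := by
  conv_lhs => rw [← Int.toNat_of_nonneg h]
  rw [PySem.List.pyGetD_natCast]

lemma pvAGetD_set {α : Type} (xs : Array α) (m k : Nat) (v d : α) :
    (xs.setIfInBounds m v).getD k d = if k = m ∧ m < xs.size then v else xs.getD k d := by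
  simp only [Array.getD_eq_getD_getElem?, Array.getElem?_setIfInBounds]
  by_cases hk : k = m
  · subst hk; by_cases hm : k < xs.size <;> simp [hm]
  · have hmk : m ≠ k := fun h => hk h.symm
    simp [hk, hmk]

lemma pvInitStep_eq (d : Array (List Int)) (i : Int) (hi : 0 ≤ i) :
    uDP_initStep d i = d.setIfInBounds 1 ((d.getD 1 []).set i.toNat i) := by
  rw [uDP_initStep, PySem.List.pySetD_of_nonneg _ _ hi]

lemma pvInit_fold (d : Array (List Int)) (hl : 1 < d.size)
    (h1 : d.getD 1 [] = List.replicate 6 0) :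
    (PySem.List.pyRange 1 6 1).foldl uDP_initStep d = d.setIfInBounds 1 (pvRow 1) := by
  have hr : PySem.List.pyRange 1 6 1 = [1, 2, 3, 4, 5] := by decide
  have hset : ∀ (r : List Int), (d.setIfInBounds 1 r).getD 1 [] = r := fun r => by
    rw [pvAGetD_set]; simp [hl]
  simp only [hr, List.foldl]
  rw [pvInitStep_eq d 1 (by omega), h1]
  rw [pvInitStep_eq _ 2 (by omega), hset, Array.setIfInBounds_setIfInBounds]
  rw [pvInitStep_eq _ 3 (by omega), hset, Array.setIfInBounds_setIfInBounds]
  rw [pvInitStep_eq _ 4 (by omega), hset, Array.setIfInBounds_setIfInBounds]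
  rw [pvInitStep_eq _ 5 (by omega), hset, Array.setIfInBounds_setIfInBounds]
  congr 1

lemma pvInnerStep_set (d : Array (List Int)) (s : Nat) (r : List Int) (htl : s + 1 < d.size)
    (hprev : d.getD s [] = pvRow s) (j : Int) (hj : 1 ≤ j) :
    uDP_innerStep ((s : Int) + 1) (d.setIfInBounds (s + 1) r) j
      = d.setIfInBounds (s + 1) (r.set j.toNat (r.getD (j - 1).toNat 0 + (pvRow s).getD j.toNat 0)) := by
  have e1 : ((s : Int) + 1).toNat = s + 1 := by omega
  have e2 : ((s : Int) + 1 - 1).toNat = s := by omega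
  rw [uDP_innerStep,
    PySem.List.pySetD_of_nonneg _ _ (by omega : (0:Int) ≤ j),
    pvGetD_toNat _ (j - 1) _ (by omega),
    pvGetD_toNat _ j _ (by omega), e1, e2]
  rw [pvAGetD_set, pvAGetD_set]
  simp only [htl, and_true, if_true]
  rw [if_neg (by omega : ¬ s = s + 1), hprev, Array.setIfInBounds_setIfInBounds]

lemma pvRowStep_eq (d : Array (List Int)) (s : Nat) (hs : 1 ≤ s) (htl : s + 1 < d.size)
    (hcur : d.getD (s + 1) [] = List.replicate 6 0) (hprev : d.getD s [] = pvRow s) :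
    uDP_rowStep d ((s : Int) + 1) = d.setIfInBounds (s + 1) (pvRow (s + 1)) := by
  have hr : PySem.List.pyRange 2 6 1 = [2, 3, 4, 5] := by decide
  have e1 : ((s : Int) + 1).toNat = s + 1 := by omega
  rw [uDP_rowStep, hr, PySem.List.pySetD_of_nonneg _ _ (by omega : (0:Int) ≤ 1), e1, hcur]
  simp only [List.foldl]
  rw [pvInnerStep_set d s _ htl hprev 2 (by omega),
    pvInnerStep_set d s _ htl hprev 3 (by omega),
    pvInnerStep_set d s _ htl hprev 4 (by omega),
    pvInnerStep_set d s _ htl hprev 5 (by omega)]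
  congr 1
  simp only [pvRow, pvBF, pvCF, pvDF]
  simp [List.getD, List.set]
  ring_nf
  exact ⟨trivial, trivial, trivial, trivial⟩

lemma pvOuter (n : Int) (m : Int) (h1m : 1 ≤ m) (hmn : m ≤ n) (d : Array (List Int))
    (hd : pvInv n 1 d) :
    pvInv n m.toNat ((PySem.List.pyRange 2 (m + 1) 1).foldl uDP_rowStep d) := by
  induction m, h1m using Int.le_induction with
  | base =>
    rw [PySem.List.pyRange_one_eq_nil (by omega)]
    simpa using hd
  | succ m hm ih =>
    have hprev := ih (by omega)
    set d' := (PySem.List.pyRange 2 (m + 1) 1).foldl uDP_rowStep d with hd'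
    obtain ⟨hlen, hrows⟩ := hprev
    have hml : m.toNat + 1 < d'.size := by rw [hlen]; omega
    have hcast : (m + 1 : Int) = ((m.toNat : Int) + 1) := by omega
    rw [PySem.List.pyRange_one_succ_right (by omega : (2:Int) ≤ m + 1), List.foldl_append]
    simp only [List.foldl, ← hd']
    rw [hcast, pvRowStep_eq d' m.toNat (by omega) hml
        (by rw [hrows _ (by omega)]; rw [if_neg (by omega)])
        (by rw [hrows _ (by omega)]; rw [if_pos (by omega)])]
    constructor
    · rw [Array.size_setIfInBounds, hlen]
    · intro k hk
      rw [pvAGetD_set]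
      by_cases hke : k = m.toNat + 1
      · subst hke
        rw [if_pos ⟨rfl, hml⟩, if_pos (by omega)]
      · rw [if_neg (by simp [hke]), hrows _ hk]
        have : ((m.toNat : Int) + 1).toNat = m.toNat + 1 := by omega
        rw [this]
        by_cases h1k : 1 ≤ k ∧ k ≤ m.toNat
        · rw [if_pos h1k, if_pos (by omega)]
        · rw [if_neg h1k, if_neg (by omega)]

theorem useless_DP_spec : Claim_equal_useless_DP := by
  intro n _ hpre
  unfold Pre_useless_DP at hpre
  simp only [Spec_useless_DP, useless_DP]
  -- initial table
  set dp0 : Array (List Int) :=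
    ((PySem.List.pyRange 0 (n + 1) 1).map (fun _ => List.replicate 6 (0 : Int))).toArray with hdp0
  have hlen0 : dp0.size = (n + 1).toNat := by
    rw [hdp0, List.size_toArray, List.length_map, PySem.List.length_pyRange_one]; omega
  have hrows0 : ∀ k : Nat, k < (n + 1).toNat → dp0.getD k [] = List.replicate 6 0 := by
    intro k hk
    rw [Array.getD_eq_getD_getElem?, hdp0, List.getElem?_toArray, List.getElem?_map]
    have hk2 : k < (PySem.List.pyRange 0 (n + 1) 1).length := by
      rw [PySem.List.length_pyRange_one]; omega
    rw [List.getElem?_eq_getElem hk2]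
    rfl
  -- after the first loop
  have hinit : (PySem.List.pyRange 1 6 1).foldl uDP_initStep dp0 = dp0.setIfInBounds 1 (pvRow 1) :=
    pvInit_fold dp0 (by omega) (hrows0 1 (by omega))
  have hinv1 : pvInv n 1 (dp0.setIfInBounds 1 (pvRow 1)) := by
    refine ⟨by rw [Array.size_setIfInBounds, hlen0], fun k hk => ?_⟩
    rw [pvAGetD_set]
    by_cases hke : k = 1
    · subst hke; rw [if_pos ⟨rfl, by omega⟩, if_pos (by omega)]
    · rw [if_neg (by simp [hke]), hrows0 _ hk, if_neg (by omega)]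
  rw [hinit]
  -- the outer loop
  have hout := pvOuter n n hpre le_rfl _ hinv1
  obtain ⟨hlen, hrows⟩ := hout
  -- read dp[n][5]
  rw [hrows n.toNat (by omega), if_pos (by omega)]
  have hrow5 : PySem.List.pyGetD (pvRow n.toNat) 5 0 = pvDF n.toNat := by
    simp [pvRow, pvGetD_toNat _ (5:Int) _ (by omega), List.getD]
  rw [hrow5]
  -- closed form
  have h24 := pvDF_eq n.toNat
  have hc : ((n.toNat : Int)) = n := Int.toNat_of_nonneg (by omega)
  rw [hc] at h24
  unfold useless_DP_alt
  rw [show (n + 1) * (n + 2) * (n + 3) * (n + 4) = 24 * pvDF n.toNat from by linarith]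
  rw [PySem.Int.floordiv_eq_ediv_of_pos (by norm_num : (0:Int) < 24),
    Int.mul_ediv_cancel_left _ (by norm_num : (24:Int) ≠ 0)]
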